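-- pv_equiv track=rewrite | github.com/datawhalechina/huawei-od-python | codes/choice100/291_Maximum-Number-of-Substrings-Extracted.py | solution
-- ===== SOURCE A (Python) =====
-- def solution(A:list, B:list)->int:
-- 	# ababcecfdc
-- 	# abc
-- 	res = 0
-- 	exist = [True for _ in range(len(A))] # -1:removed
-- 	flg = True # Find one pair?
-- 	while flg: # not null
-- 		flg = False
-- 		ib = 0
-- 		for ia in range(len(A)):
-- 			if exist[ia]: # exist
-- 				if A[ia] == B[ib]: # match
-- 					ib += 1 # move forward
-- 					exist[ia] = False # remove
-- 				ia += 1 # move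
--
-- 			if ib == len(B): # reach end of B
-- 				res += 1
-- 				flg = True
-- 				break
-- 	return res
-- ===== SOURCE B (Python) =====
-- def solution(A: list, B: list) -> int:
--     # Single left-to-right pass over A with a stage counter per position of B:
--     # cnt[j] = number of partial copies of B that have matched B[:j] so far.
--     # Each character advances the MOST ADVANCED matching partial copy (or
--     # starts a new copy when it equals B[0]); completed copies are counted.
--     m = len(B)
--     if m == 0:
--         return 0
--     cnt = [0] * (m + 1)
--     done = 0
--     for c in A:
--         for j in range(m - 1, 0, -1):
--             if B[j] == c and cnt[j] > 0:
--                 cnt[j] -= 1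
--                 if j + 1 == m:
--                     done += 1
--                 else:
--                     cnt[j + 1] += 1
--                 break
--         else:
--             if B[0] == c:
--                 if m == 1:
--                     done += 1
--                 else:
--                     cnt[1] += 1
--     return done
-- ===== Notes on version B (the rewrite author's own statement) =====
-- stated objective: alternative
-- what changed: Replaces A's restart-the-scan-per-extracted-copy outer loop (one full pass over A with an exist mask for every copy found) by a single left-to-right pass over A that maintains cnt[j] = number of partial copies currently having matched B[:j] and advances the most advanced matching partial copy at each character; no mask, no restarts.
import Mathlib
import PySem

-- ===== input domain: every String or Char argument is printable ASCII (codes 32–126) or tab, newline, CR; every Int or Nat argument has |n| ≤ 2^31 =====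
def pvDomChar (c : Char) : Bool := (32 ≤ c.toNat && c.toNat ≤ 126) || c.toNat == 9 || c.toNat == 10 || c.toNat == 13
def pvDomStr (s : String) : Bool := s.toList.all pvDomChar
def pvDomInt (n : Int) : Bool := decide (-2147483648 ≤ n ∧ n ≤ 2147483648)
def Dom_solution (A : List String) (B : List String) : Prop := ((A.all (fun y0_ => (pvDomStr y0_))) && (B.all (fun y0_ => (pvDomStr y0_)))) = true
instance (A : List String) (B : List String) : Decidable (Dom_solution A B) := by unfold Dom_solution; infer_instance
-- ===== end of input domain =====

-- B replaces A's repeated restart-scans of A (one pass per extracted copy) by a SINGLE left-to-right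
-- pass over A that keeps, for every stage j of B, the number of partial copies having matched B[:j],
-- advancing the most advanced matching partial copy at each character (different algorithm).


-- ===== PORT A =====
-- one pass of A's inner for-loop: walks the (char, exist) pairs carrying ib;
-- on a match clears the exist flag and advances ib; breaks as soon as ib = len(B)
def solPass (B : List String) : List (String × Bool) → Nat → List (String × Bool) × Bool
  | [], _ => ([], false)
  | (c, e) :: rest, ib =>
    let p : Bool × Nat := if e then (if B[ib]? = some c then (false, ib + 1) else (e, ib)) else (e, ib)
    if p.2 = B.length then ((c, p.1) :: rest, true)
    else
      let q := solPass B rest p.2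
      ((c, p.1) :: q.1, q.2)

-- A's while-flg loop; fuel = len(A)+1 passes always suffices when B ≠ [] (Pre_)
def solLoop (B : List String) : Nat → List (String × Bool) → Int → Int
  | 0, _, res => res
  | fuel + 1, st, res =>
    let r := solPass B st 0
    if r.2 then solLoop B fuel r.1 (res + 1) else res

def solution (A : List String) (B : List String) : Int :=
  solLoop B (A.length + 1) (A.map (fun c => (c, true))) 0

-- ===== PORT B =====
-- Source B's inner `for j in range(m-1, 0, -1): … break / else: …`: scan stages j = k, k-1, …, 1
-- for the most advanced partial copy matching c (cnt[j] > 0 and B[j] == c)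
def findStage (B : List String) (cnt : List Nat) (c : String) : Nat → Option Nat
  | 0 => none
  | j + 1 =>
    if B[j + 1]? = some c ∧ 0 < cnt.getD (j + 1) 0 then some (j + 1)
    else findStage B cnt c j

-- one character of Source B's single pass: advance the found copy (complete it when it
-- reaches the end of B), else start a new copy when c matches B[0]
def stepAlt (B : List String) (st : List Nat × Int) (c : String) : List Nat × Int :=
  match findStage B st.1 c (B.length - 1) with
  | some j =>
      if j + 1 = B.length then (st.1.modify j (· - 1), st.2 + 1)
      else ((st.1.modify j (· - 1)).modify (j + 1) (· + 1), st.2)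
  | none =>
      if B[0]? = some c then
        if B.length = 1 then (st.1, st.2 + 1) else (st.1.modify 1 (· + 1), st.2)
      else st

def solution_alt (A : List String) (B : List String) : Int :=
  if B.length = 0 then 0
  else (List.foldl (stepAlt B) (List.replicate (B.length + 1) 0, 0) A).2

-- ===== PRECONDITION & SPEC =====
-- Pre_ excludes exactly the inputs where the Python A raises IndexError (B[0] with B empty, reached whenever A is nonempty).
def Pre_solution (A : List String) (B : List String) : Prop := A = [] ∨ B ≠ []
instance (A : List String) (B : List String) : Decidable (Pre_solution A B) := by unfold Pre_solution; infer_instance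

def pvWitness_solution : List String × List String := (["a", "b", "a", "b", "c"], ["a", "b"])

def Spec_solution (A : List String) (B : List String) (out : Int) : Prop := out = solution_alt A B
instance (A : List String) (B : List String) (out : Int) : Decidable (Spec_solution A B out) := by unfold Spec_solution; infer_instance

-- ===== CLAIM (what is proved, stated in full; the proofs are below) =====
def Claim_equal_solution : Prop := ∀ (A : List String) (B : List String), Dom_solution A B → Pre_solution A B → Spec_solution A B (solution A B)

-- ===== LEMMAS AND PROOFS =====

-- greedy extraction of one copy of B (proof-side bridge between the two ports):
-- matched-prefix length of B and the residual of unmatched characters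
def extGreedy (B : List String) : List String → Nat → Nat × List String
  | [], ib => (ib, [])
  | c :: rest, ib =>
    if ib < B.length ∧ B[ib]? = some c then extGreedy B rest (ib + 1)
    else
      let q := extGreedy B rest ib
      (q.1, c :: q.2)

theorem ext_len (B : List String) : ∀ (l : List String) (ib : Nat),
    (extGreedy B l ib).2.length + (extGreedy B l ib).1 = l.length + ib := by
  intro l
  induction l with
  | nil => intro ib; simp [extGreedy]
  | cons c rest ih =>
    intro ib
    simp only [extGreedy]
    split
    · have := ih (ib + 1); simp only [List.length_cons] at *; omega
    · have := ih ib; simp only [List.length_cons] at *; omega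

theorem ext_le (B : List String) : ∀ (l : List String) (ib : Nat),
    ib ≤ B.length → (extGreedy B l ib).1 ≤ B.length := by
  intro l
  induction l with
  | nil => intro ib h; simpa [extGreedy] using h
  | cons c rest ih =>
    intro ib h
    simp only [extGreedy]
    split
    · rename_i hc; exact ih (ib + 1) hc.1
    · exact ih ib h

theorem ext_ge (B : List String) : ∀ (l : List String) (ib : Nat),
    ib ≤ (extGreedy B l ib).1 := by
  intro l
  induction l with
  | nil => intro ib; simp [extGreedy]
  | cons c rest ih =>
    intro ib
    simp only [extGreedy]
    split
    · have := ih (ib + 1); omega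
    · exact ih ib

theorem ext_sublist (B : List String) : ∀ (l : List String) (ib : Nat),
    List.Sublist (extGreedy B l ib).2 l := by
  intro l
  induction l with
  | nil => intro ib; simp [extGreedy]
  | cons c rest ih =>
    intro ib
    simp only [extGreedy]
    split
    · exact (ih (ib + 1)).cons c
    · exact (ih ib).cons₂ c

theorem ext_mono_ib (B : List String) : ∀ (l : List String) (ib : Nat),
    (extGreedy B l ib).1 ≤ (extGreedy B l (ib + 1)).1 := by
  intro l
  induction l with
  | nil => intro ib; simp [extGreedy]
  | cons c rest ih =>
    intro ib
    simp only [extGreedy]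
    by_cases h1 : ib < B.length ∧ B[ib]? = some c <;>
      by_cases h2 : ib + 1 < B.length ∧ B[ib + 1]? = some c
    · rw [if_pos h1, if_pos h2]; exact ih (ib + 1)
    · rw [if_pos h1, if_neg h2]
    · rw [if_neg h1, if_pos h2]; exact (ih ib).trans (ih (ib + 1))
    · rw [if_neg h1, if_neg h2]; exact ih ib

theorem ext_mono_sub (B : List String) {l₁ l₂ : List String} (h : List.Sublist l₁ l₂) :
    ∀ ib, (extGreedy B l₁ ib).1 ≤ (extGreedy B l₂ ib).1 := by
  induction h with
  | slnil => intro ib; exact le_refl _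
  | cons c h ih =>
    intro ib
    rename_i la lb
    simp only [extGreedy]
    by_cases hc : ib < B.length ∧ B[ib]? = some c
    · rw [if_pos hc]; exact (ih ib).trans (ext_mono_ib B lb ib)
    · rw [if_neg hc]; exact ih ib
  | cons₂ c h ih =>
    intro ib
    simp only [extGreedy]
    by_cases hc : ib < B.length ∧ B[ib]? = some c
    · rw [if_pos hc, if_pos hc]; exact ih (ib + 1)
    · rw [if_neg hc, if_neg hc]; exact ih ib

theorem ext_zero_head (B : List String) (hm : 0 < B.length) : ∀ (l : List String),
    (extGreedy B l 0).1 = 0 → ∀ c ∈ l, ¬ (B[0]? = some c) := by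
  intro l
  induction l with
  | nil => intro _ c hc; simp at hc
  | cons c rest ih =>
    intro h0 x hx
    simp only [extGreedy] at h0
    by_cases hc : B[0]? = some c
    · rw [if_pos ⟨hm, hc⟩] at h0
      have h1 : (extGreedy B rest 1).1 = 0 := by simpa using h0
      have := ext_ge B rest 1
      omega
    · rw [if_neg (fun hh => hc hh.2)] at h0
      rw [List.mem_cons] at hx
      rcases hx with hx | hx
      · subst hx; exact hc
      · exact ih h0 x hx

-- extraction recursion matching A's outer loop (proof-side helper)
def extCount (B : List String) (hB : B ≠ []) (cur : List String) (res : Int) : Int :=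
  let t := extGreedy B cur 0
  if t.1 < B.length then res else extCount B hB t.2 (res + 1)
termination_by cur.length
decreasing_by
  have h1 := ext_le B cur 0 (Nat.zero_le _)
  have h2 := ext_len B cur 0
  have h3 : B.length ≠ 0 := by simpa using hB
  simp only [t] at *
  omega

-- ---------- A-side: solution = extCount ----------

-- the characters A's mask still marks as present, in order
def maskRes (st : List (String × Bool)) : List String :=
  (st.filter (fun p => p.2)).map (fun p => p.1)

theorem maskRes_cons_true (c : String) (l : List (String × Bool)) :
    maskRes ((c, true) :: l) = c :: maskRes l := by simp [maskRes]

theorem maskRes_cons_false (c : String) (l : List (String × Bool)) :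
    maskRes ((c, false) :: l) = maskRes l := by simp [maskRes]

theorem ext_cap (B : List String) : ∀ (l : List String),
    extGreedy B l B.length = (B.length, l) := by
  intro l
  induction l with
  | nil => simp [extGreedy]
  | cons c rest ih => simp [extGreedy, ih]

theorem pass_equiv (B : List String) : ∀ (st : List (String × Bool)) (ib : Nat), ib < B.length →
    ((solPass B st ib).2 = true ↔ (extGreedy B (maskRes st) ib).1 = B.length) ∧
    ((extGreedy B (maskRes st) ib).1 = B.length →
      maskRes (solPass B st ib).1 = (extGreedy B (maskRes st) ib).2) := by
  intro st
  induction st with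
  | nil =>
    intro ib hib
    refine ⟨?_, fun _ => rfl⟩
    simp only [solPass, maskRes, extGreedy, List.filter_nil, List.map_nil]
    constructor
    · intro h; exact absurd h (by simp)
    · intro h; omega
  | cons ce rest ih =>
    obtain ⟨c, e⟩ := ce
    intro ib hib
    cases e with
    | true =>
      by_cases hm : B[ib]? = some c
      · have hL : solPass B ((c, true) :: rest) ib =
            if ib + 1 = B.length then ((c, false) :: rest, true)
            else ((c, false) :: (solPass B rest (ib + 1)).1, (solPass B rest (ib + 1)).2) := by
          simp [solPass, hm]
        have hR : extGreedy B (maskRes ((c, true) :: rest)) ib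
            = extGreedy B (maskRes rest) (ib + 1) := by
          rw [maskRes_cons_true]
          simp only [extGreedy]
          rw [if_pos (And.intro hib hm)]
        rw [hL, hR]
        by_cases hend : ib + 1 = B.length
        · rw [if_pos hend, hend, ext_cap]
          refine ⟨by simp, fun _ => ?_⟩
          exact maskRes_cons_false c rest
        · have hlt : ib + 1 < B.length := by omega
          rw [if_neg hend]
          refine ⟨(ih (ib + 1) hlt).1, fun h => ?_⟩
          rw [maskRes_cons_false, (ih (ib + 1) hlt).2 h]
      · have hne : ¬ (ib = B.length) := by omega
        have hL : solPass B ((c, true) :: rest) ib =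
            ((c, true) :: (solPass B rest ib).1, (solPass B rest ib).2) := by
          simp [solPass, hm, hne]
        have hR : extGreedy B (maskRes ((c, true) :: rest)) ib
            = ((extGreedy B (maskRes rest) ib).1, c :: (extGreedy B (maskRes rest) ib).2) := by
          rw [maskRes_cons_true]
          simp only [extGreedy]
          rw [if_neg (fun hc => hm hc.2)]
        rw [hL, hR]
        refine ⟨(ih ib hib).1, fun h => ?_⟩
        rw [maskRes_cons_true, (ih ib hib).2 h]
    | false =>
      have hne : ¬ (ib = B.length) := by omega
      have hL : solPass B ((c, false) :: rest) ib =
          ((c, false) :: (solPass B rest ib).1, (solPass B rest ib).2) := by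
        simp [solPass, hne]
      rw [hL, maskRes_cons_false]
      refine ⟨(ih ib hib).1, fun h => ?_⟩
      rw [maskRes_cons_false, (ih ib hib).2 h]

theorem loop_equiv (B : List String) (hB : B ≠ []) : ∀ (fuel : Nat) (st : List (String × Bool)) (res : Int),
    (maskRes st).length < fuel → solLoop B fuel st res = extCount B hB (maskRes st) res := by
  intro fuel
  induction fuel with
  | zero => intro st res h; omega
  | succ fuel ih =>
    intro st res h
    have hpos : 0 < B.length := List.length_pos_of_ne_nil hB
    have hpe := pass_equiv B st 0 hpos
    rw [extCount.eq_def]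
    simp only [solLoop]
    by_cases hfull : (extGreedy B (maskRes st) 0).1 = B.length
    · have hfound : (solPass B st 0).2 = true := hpe.1.mpr hfull
      have hres := hpe.2 hfull
      have hlen := ext_len B (maskRes st) 0
      rw [if_pos hfound, if_neg (by omega)]
      rw [ih _ _ (by rw [hres]; omega)]
      rw [hres]
    · have hfound : (solPass B st 0).2 = false := by
        cases hq : (solPass B st 0).2
        · rfl
        · exact absurd (hpe.1.mp hq) hfull
      have hle := ext_le B (maskRes st) 0 (Nat.zero_le _)
      rw [if_neg (by simp [hfound]), if_pos (by omega)]

theorem maskRes_map (A : List String) : maskRes (A.map (fun c => (c, true))) = A := by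
  induction A with
  | nil => rfl
  | cons c rest ih => simp only [List.map_cons, maskRes_cons_true, ih]

-- ---------- B-side: the single pass = extCount ----------

-- one extra partial copy at stage ib, superimposed on a state
def bumpSt (B : List String) (ib : Nat) (st : List Nat × Int) : List Nat × Int :=
  if ib = B.length then (st.1, st.2 + 1)
  else if ib = 0 then st
  else (st.1.modify ib (· + 1), st.2)

theorem getD_modify_ne (cnt : List Nat) (i j : Nat) (f : Nat → Nat) (h : i ≠ j) :
    (cnt.modify i f).getD j 0 = cnt.getD j 0 := by
  simp [List.getD_eq_getElem?_getD, h]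

theorem getD_modify_eq (cnt : List Nat) (i : Nat) (f : Nat → Nat) (h : i < cnt.length) :
    (cnt.modify i f).getD i 0 = f (cnt.getD i 0) := by
  simp [List.getD_eq_getElem?_getD, List.getElem?_eq_getElem h]

theorem getD_replicate_zero (n j : Nat) : (List.replicate n (0 : Nat)).getD j 0 = 0 := by
  simp [List.getD_eq_getElem?_getD, List.getElem?_replicate]
  split <;> rfl

theorem find_none (B : List String) (cnt : List Nat) (c : String) :
    ∀ k, (∀ j, 1 ≤ j → j ≤ k → cnt.getD j 0 = 0) → findStage B cnt c k = none := by
  intro k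
  induction k with
  | zero => intro _; rfl
  | succ k ih =>
    intro h
    simp only [findStage]
    have hz := h (k + 1) (by omega) (le_refl _)
    rw [if_neg (by rintro ⟨_, hpos⟩; omega)]
    exact ih (fun j hj1 hj2 => h j hj1 (by omega))

theorem find_some (B : List String) (cnt : List Nat) (c : String) :
    ∀ k j, findStage B cnt c k = some j → 1 ≤ j ∧ j ≤ k ∧ B[j]? = some c ∧ 0 < cnt.getD j 0 := by
  intro k
  induction k with
  | zero => intro j h; simp [findStage] at h
  | succ k ih =>
    intro j h
    simp only [findStage] at h
    split at h
    · rename_i hc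
      cases h
      exact ⟨by omega, le_refl _, hc.1, hc.2⟩
    · have := ih j h
      exact ⟨this.1, by omega, this.2.2⟩

theorem find_top (B : List String) (cnt : List Nat) (c : String) (ib : Nat)
    (hc : B[ib]? = some c) (hpos : 0 < cnt.getD ib 0) (h1 : 1 ≤ ib)
    (hzero : ∀ j, ib < j → cnt.getD j 0 = 0) :
    ∀ k, ib ≤ k → findStage B cnt c k = some ib := by
  intro k
  induction k with
  | zero => intro h; omega
  | succ k ih =>
    intro h
    simp only [findStage]
    by_cases he : ib = k + 1
    · subst he; rw [if_pos ⟨hc, hpos⟩]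
    · rw [if_neg (by
        intro hh
        have := hzero (k + 1) (by omega)
        omega)]
      exact ih (by omega)

theorem find_congr (B : List String) (cnt1 cnt2 : List Nat) (c : String) :
    ∀ k, (∀ j, 1 ≤ j → j ≤ k → B[j]? = some c → cnt1.getD j 0 = cnt2.getD j 0) →
    findStage B cnt1 c k = findStage B cnt2 c k := by
  intro k
  induction k with
  | zero => intro _; rfl
  | succ k ih =>
    intro h
    simp only [findStage]
    by_cases hc : B[k + 1]? = some c
    · rw [h (k + 1) (by omega) (le_refl _) hc]
      split
      · rfl
      · exact ih (fun j h1 h2 hc' => h j h1 (by omega) hc')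
    · rw [if_neg (fun hh => hc hh.1), if_neg (fun hh => hc hh.1)]
      exact ih (fun j h1 h2 hc' => h j h1 (by omega) hc')

theorem step_shift (B : List String) (cnt : List Nat) (d : Int) (c : String) :
    stepAlt B (cnt, d + 1) c = ((stepAlt B (cnt, d) c).1, (stepAlt B (cnt, d) c).2 + 1) := by
  cases hf : findStage B cnt c (B.length - 1) <;>
    simp only [stepAlt, hf] <;> split_ifs <;> rfl

theorem step_len (B : List String) (cnt : List Nat) (d : Int) (c : String) :
    (stepAlt B (cnt, d) c).1.length = cnt.length := by
  cases hf : findStage B cnt c (B.length - 1) <;>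
    simp only [stepAlt, hf] <;> split_ifs <;> simp [List.length_modify]

theorem step_zero_pres (B : List String) (cnt : List Nat) (d : Int) (c : String) (ib : Nat)
    (hB : B ≠ []) (hib : ib ≤ B.length)
    (hzero : ∀ j, ib < j → cnt.getD j 0 = 0)
    (hnc : ib < B.length → ¬ (B[ib]? = some c)) :
    ∀ j, ib < j → (stepAlt B (cnt, d) c).1.getD j 0 = 0 := by
  intro j hj
  have hm : 0 < B.length := List.length_pos_of_ne_nil hB
  cases hf : findStage B cnt c (B.length - 1) with
  | none =>
    simp only [stepAlt, hf]
    by_cases hc : B[0]? = some c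
    · rw [if_pos hc]
      have h1 : 1 ≤ ib := by
        by_contra hh
        have : ib = 0 := by omega
        subst this
        exact hnc hm hc
      split_ifs
      · exact hzero j hj
      · rw [getD_modify_ne _ _ _ _ (by omega)]
        exact hzero j hj
    · rw [if_neg hc]
      exact hzero j hj
  | some j0 =>
    simp only [stepAlt, hf]
    have hs := find_some B cnt c (B.length - 1) j0 hf
    have hj0 : j0 ≤ ib := by
      by_contra hh
      have := hzero j0 (by omega)
      omega
    have hj0ne : j0 ≠ ib := by
      intro he
      subst he
      by_cases hlt : j0 < B.length
      · exact hnc hlt hs.2.2.1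
      · omega
    split_ifs
    · rw [getD_modify_ne _ _ _ _ (by omega)]
      exact hzero j hj
    · rw [getD_modify_ne _ _ _ _ (by omega), getD_modify_ne _ _ _ _ (by omega)]
      exact hzero j hj

theorem step_adv (B : List String) (cnt : List Nat) (d : Int) (c : String) (ib : Nat)
    (hB : B ≠ []) (hlen : cnt.length = B.length + 1) (hib : ib < B.length)
    (hc : B[ib]? = some c) (hzero : ∀ j, ib < j → cnt.getD j 0 = 0) :
    stepAlt B (bumpSt B ib (cnt, d)) c = bumpSt B (ib + 1) (cnt, d) := by
  have hm : 0 < B.length := List.length_pos_of_ne_nil hB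
  by_cases h0 : ib = 0
  · subst h0
    have hbump : bumpSt B 0 (cnt, d) = (cnt, d) := by
      simp only [bumpSt]
      rw [if_neg (by omega)]; simp
    rw [hbump]
    have hfn : findStage B cnt c (B.length - 1) = none :=
      find_none B cnt c (B.length - 1) (fun j h1 h2 => hzero j (by omega))
    simp only [stepAlt, hfn]
    rw [if_pos hc]
    simp only [bumpSt]
    by_cases h1 : B.length = 1
    · rw [if_pos h1, if_pos (by omega)]
    · rw [if_neg h1, if_neg (by omega), if_neg (by omega)]
  · have h1 : 1 ≤ ib := by omega
    have hbump : bumpSt B ib (cnt, d) = (cnt.modify ib (· + 1), d) := by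
      simp only [bumpSt]
      rw [if_neg (by omega), if_neg h0]
    rw [hbump]
    have hfind : findStage B (cnt.modify ib (· + 1)) c (B.length - 1) = some ib := by
      apply find_top B _ c ib hc
      · rw [getD_modify_eq _ _ _ (by omega)]; omega
      · exact h1
      · intro j hj
        rw [getD_modify_ne _ _ _ _ (by omega)]
        exact hzero j hj
      · omega
    simp only [stepAlt, hfind]
    have hcollapse : (cnt.modify ib (· + 1)).modify ib (· - 1) = cnt := by
      rw [List.modify_modify_eq]
      have : ((· - 1) ∘ (· + 1) : Nat → Nat) = id := by funext x; simp
      rw [this, List.modify_id]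
    simp only [hcollapse]
    by_cases hend : ib + 1 = B.length
    · rw [if_pos hend]
      simp only [bumpSt]
      rw [if_pos hend]
    · rw [if_neg hend]
      simp only [bumpSt]
      rw [if_neg hend, if_neg (by omega)]

theorem step_comm (B : List String) (cnt : List Nat) (d : Int) (c : String) (ib : Nat)
    (hB : B ≠ []) (_hlen : cnt.length = B.length + 1) (hib : ib ≤ B.length)
    (hzero : ∀ j, ib < j → cnt.getD j 0 = 0)
    (hnc : ib < B.length → ¬ (B[ib]? = some c)) :
    stepAlt B (bumpSt B ib (cnt, d)) c = bumpSt B ib (stepAlt B (cnt, d) c) := by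
  have hm : 0 < B.length := List.length_pos_of_ne_nil hB
  by_cases hM : ib = B.length
  · subst hM
    have hbump : ∀ (st : List Nat × Int), bumpSt B B.length st = (st.1, st.2 + 1) := by
      intro st; simp [bumpSt]
    rw [hbump, hbump]
    exact step_shift B cnt d c
  · by_cases h0 : ib = 0
    · subst h0
      have hbump : ∀ (st : List Nat × Int), bumpSt B 0 st = st := by
        intro st; simp only [bumpSt]; rw [if_neg (by omega)]; simp
      rw [hbump, hbump]
    · have h1 : 1 ≤ ib := by omega
      have hiblt : ib < B.length := by omega
      have hbump : ∀ (cnt' : List Nat) (d' : Int), bumpSt B ib (cnt', d') = (cnt'.modify ib (· + 1), d') := by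
        intro cnt' d'; simp only [bumpSt]; rw [if_neg hM, if_neg h0]
      rw [hbump]
      have hfind : findStage B (cnt.modify ib (· + 1)) c (B.length - 1)
          = findStage B cnt c (B.length - 1) := by
        apply find_congr
        intro j hj1 hj2 hcj
        apply getD_modify_ne
        intro he
        subst he
        exact hnc hiblt hcj
      cases hf : findStage B cnt c (B.length - 1) with
      | none =>
        simp only [stepAlt, hfind, hf]
        by_cases hc : B[0]? = some c
        · rw [if_pos hc, if_pos hc]
          have hm1 : ¬ (B.length = 1) := by omega
          rw [if_neg hm1, if_neg hm1, hbump]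
          by_cases he1 : ib = 1
          · subst he1; rfl
          · rw [List.modify_modify_ne _ _ _ (by omega)]
        · rw [if_neg hc, if_neg hc, hbump]
      | some j =>
        simp only [stepAlt, hfind, hf]
        have hs := find_some B cnt c (B.length - 1) j hf
        have hjib : j < ib := by
          have hle : j ≤ ib := by
            by_contra hh
            have := hzero j (by omega)
            omega
          have : j ≠ ib := by
            intro he; subst he
            exact hnc hiblt hs.2.2.1
          omega
        have hne1 : ¬ (j + 1 = B.length) := by omega
        rw [if_neg hne1, if_neg hne1, hbump]
        have hswap1 : (cnt.modify ib (· + 1)).modify j (· - 1)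
            = (cnt.modify j (· - 1)).modify ib (· + 1) :=
          List.modify_modify_ne _ _ _ (by omega)
        rw [hswap1]
        by_cases he : ib = j + 1
        · subst he; rfl
        · have hswap2 : ((cnt.modify j (· - 1)).modify ib (· + 1)).modify (j + 1) (· + 1)
              = ((cnt.modify j (· - 1)).modify (j + 1) (· + 1)).modify ib (· + 1) :=
            List.modify_modify_ne _ _ _ (by omega)
          rw [hswap2]

theorem inv_pass (B : List String) (hB : B ≠ []) :
    ∀ (l : List String) (cnt : List Nat) (d : Int) (ib : Nat),
    cnt.length = B.length + 1 → ib ≤ B.length → (∀ j, ib < j → cnt.getD j 0 = 0) →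
    List.foldl (stepAlt B) (bumpSt B ib (cnt, d)) l
      = bumpSt B (extGreedy B l ib).1 (List.foldl (stepAlt B) (cnt, d) (extGreedy B l ib).2) := by
  intro l
  induction l with
  | nil => intro cnt d ib _ _ _; simp [extGreedy]
  | cons c rest ih =>
    intro cnt d ib hlen hib hzero
    by_cases hc : ib < B.length ∧ B[ib]? = some c
    · have hext : extGreedy B (c :: rest) ib = extGreedy B rest (ib + 1) := by
        simp only [extGreedy]; rw [if_pos hc]
      rw [hext]
      simp only [List.foldl_cons]
      rw [step_adv B cnt d c ib hB hlen hc.1 hc.2 hzero]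
      exact ih cnt d (ib + 1) hlen (by omega) (fun j hj => hzero j (by omega))
    · have hext : extGreedy B (c :: rest) ib
          = ((extGreedy B rest ib).1, c :: (extGreedy B rest ib).2) := by
        simp only [extGreedy]; rw [if_neg hc]
      rw [hext]
      simp only [List.foldl_cons]
      have hnc : ib < B.length → ¬ (B[ib]? = some c) := by
        intro hlt hcc; exact hc ⟨hlt, hcc⟩
      rw [step_comm B cnt d c ib hB hlen hib hzero hnc]
      cases hst : stepAlt B (cnt, d) c with
      | mk cnt' d' =>
        have hlen' : cnt'.length = B.length + 1 := by
          have := step_len B cnt d c; rw [hst] at this; simpa [hlen] using this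
        have hzero' : ∀ j, ib < j → cnt'.getD j 0 = 0 := by
          intro j hj
          have := step_zero_pres B cnt d c ib hB hib hzero hnc j hj
          rw [hst] at this; exact this
        exact ih cnt' d' ib hlen' hib hzero'

theorem mp_noop (B : List String) :
    ∀ (l : List String) (d : Int), (∀ c ∈ l, ¬ (B[0]? = some c)) →
    List.foldl (stepAlt B) (List.replicate (B.length + 1) 0, d) l
      = (List.replicate (B.length + 1) 0, d) := by
  intro l
  induction l with
  | nil => intro d _; rfl
  | cons c rest ih =>
    intro d h
    simp only [List.foldl_cons]
    have hstep : stepAlt B (List.replicate (B.length + 1) 0, d) c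
        = (List.replicate (B.length + 1) 0, d) := by
      have hfn : findStage B (List.replicate (B.length + 1) 0) c (B.length - 1) = none :=
        find_none B _ c (B.length - 1) (fun j _ _ => getD_replicate_zero _ j)
      simp only [stepAlt, hfn]
      rw [if_neg (h c (by simp))]
    rw [hstep]
    exact ih d (fun x hx => h x (by simp [hx]))

theorem extCount_eq_mp (B : List String) (hB : B ≠ []) :
    ∀ (n : Nat) (A : List String), A.length ≤ n → ∀ (res : Int),
    extCount B hB A res
      = res + (List.foldl (stepAlt B) (List.replicate (B.length + 1) 0, 0) A).2 := by
  intro n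
  induction n with
  | zero =>
    intro A hA res
    have : A = [] := List.eq_nil_of_length_eq_zero (by omega)
    subst this
    rw [extCount.eq_def]
    simp [extGreedy, List.length_pos_of_ne_nil hB]
  | succ n ih =>
    intro A hA res
    have hm : 0 < B.length := List.length_pos_of_ne_nil hB
    have hinv := inv_pass B hB A (List.replicate (B.length + 1) 0) 0 0
      (by simp) (by omega) (fun j _ => getD_replicate_zero _ j)
    have hbump0 : bumpSt B 0 (List.replicate (B.length + 1) 0, (0 : Int))
        = (List.replicate (B.length + 1) 0, (0 : Int)) := by
      simp only [bumpSt]; rw [if_neg (by omega)]; simp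
    rw [hbump0] at hinv
    have hlenA := ext_len B A 0
    have hleA := ext_le B A 0 (Nat.zero_le _)
    rw [extCount.eq_def]
    simp only []
    by_cases hfull : (extGreedy B A 0).1 = B.length
    · rw [if_neg (by omega)]
      have hsub : (extGreedy B A 0).2.length ≤ n := by omega
      rw [ih (extGreedy B A 0).2 hsub (res + 1)]
      rw [hinv]
      have : bumpSt B (extGreedy B A 0).1
          (List.foldl (stepAlt B) (List.replicate (B.length + 1) 0, 0) (extGreedy B A 0).2)
          = ((List.foldl (stepAlt B) (List.replicate (B.length + 1) 0, 0) (extGreedy B A 0).2).1,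
             (List.foldl (stepAlt B) (List.replicate (B.length + 1) 0, 0) (extGreedy B A 0).2).2 + 1) := by
        simp only [bumpSt]; rw [if_pos hfull]
      rw [this]
      ring
    · rw [if_pos (by omega)]
      by_cases h0 : (extGreedy B A 0).1 = 0
      · have hnoop := mp_noop B A 0 (ext_zero_head B hm A h0)
        rw [hnoop]; simp
      · have hsub : (extGreedy B A 0).2.length ≤ n := by omega
        have hres2 : (List.foldl (stepAlt B) (List.replicate (B.length + 1) 0, 0)
            (extGreedy B A 0).2).2 = 0 := by
          have hihr := ih (extGreedy B A 0).2 hsub 0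
          rw [extCount.eq_def] at hihr
          simp only [] at hihr
          have hless : (extGreedy B (extGreedy B A 0).2 0).1 < B.length := by
            have := ext_mono_sub B (ext_sublist B A 0) 0
            omega
          rw [if_pos hless] at hihr
          omega
        rw [hinv]
        have : (bumpSt B (extGreedy B A 0).1
            (List.foldl (stepAlt B) (List.replicate (B.length + 1) 0, 0) (extGreedy B A 0).2)).2
            = (List.foldl (stepAlt B) (List.replicate (B.length + 1) 0, 0) (extGreedy B A 0).2).2 := by
          simp only [bumpSt]
          rw [if_neg hfull, if_neg h0]
        rw [this, hres2]
        ring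

-- ===== VERDICT (by name: the statement is the Claim_ definition above) =====
theorem solution_spec : Claim_equal_solution := by
  intro A B _ hpre
  unfold Spec_solution solution solution_alt
  by_cases hB : B = []
  · subst hB
    rcases hpre with h | h
    · subst h; rfl
    · exact absurd rfl h
  · rw [if_neg (by simpa using hB)]
    have h1 := loop_equiv B hB (A.length + 1) (A.map (fun c => (c, true))) 0
      (by rw [maskRes_map]; omega)
    rw [h1, maskRes_map]
    rw [extCount_eq_mp B hB A.length A (le_refl _) 0]
    ring
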